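-- pv_equiv track=rewrite | github.com/The-Pizza/Cloudflare-DDNS | cloudflare-ddns.py | best_zone_for_name
-- ===== SOURCE A (Python) =====
-- from typing import Dict, List, Optional, Tuple
--
-- def best_zone_for_name(zones_by_name: Dict[str, str], fqdn: str) -> Optional[Tuple[str, str]]:
--     """
--     Find the longest matching zone for a given FQDN.
--     Returns (zone_name, zone_id) or None.
--     """
--     fqdn_l = fqdn.lower().rstrip(".")
--     best = None
--     for zname, zid in zones_by_name.items():
--         if fqdn_l == zname or fqdn_l.endswith("." + zname):
--             if best is None or len(zname) > len(best[0]):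
--                 best = (zname, zid)
--     return best
-- ===== SOURCE B (Python) =====
-- def best_zone_for_name(zones_by_name, fqdn):
--     """
--     Find the longest matching zone for a given FQDN.
--     Walks the dot-delimited suffixes of the FQDN from longest to shortest and
--     returns the first one present in the dict (O(#labels) hash lookups).
--     Returns (zone_name, zone_id) or None.
--     """
--     name = fqdn.lower().rstrip(".")
--     while True:
--         if name in zones_by_name:
--             return (name, zones_by_name[name])
--         dot = name.find(".")
--         if dot < 0:
--             return None
--         name = name[dot + 1:]
-- ===== Notes on version B (the rewrite author's own statement) =====
-- stated objective: alternative
-- what changed: Instead of scanning every zone and testing it as a suffix of the FQDN, B enumerates the FQDN's dot-delimited suffixes from longest to shortest and returns the first one present in the dict, so the scan over the zones disappears (one hash lookup per label; measured ~1.4x at the largest size, below the 1.5x bar, so not claimed as faster).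
import Mathlib
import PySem

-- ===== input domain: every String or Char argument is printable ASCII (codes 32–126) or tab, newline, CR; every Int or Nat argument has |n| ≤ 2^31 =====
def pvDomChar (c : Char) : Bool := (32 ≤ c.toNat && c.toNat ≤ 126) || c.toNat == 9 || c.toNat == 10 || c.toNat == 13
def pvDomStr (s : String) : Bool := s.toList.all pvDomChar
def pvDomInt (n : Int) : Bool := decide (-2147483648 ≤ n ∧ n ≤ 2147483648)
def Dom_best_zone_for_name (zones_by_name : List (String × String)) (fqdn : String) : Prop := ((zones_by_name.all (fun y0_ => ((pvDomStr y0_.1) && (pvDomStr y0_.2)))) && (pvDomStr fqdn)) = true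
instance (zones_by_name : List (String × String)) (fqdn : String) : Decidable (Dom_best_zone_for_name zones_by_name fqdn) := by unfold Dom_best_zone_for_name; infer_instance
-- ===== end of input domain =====

-- B walks the dot-delimited suffixes of the FQDN from longest to shortest and returns the
-- first one found in the dict (a per-label lookup) instead of A's suffix test against every zone.

-- shared preamble helper: Python's s.rstrip(".") — drop the trailing run of '.' characters (exact)
def pvRstripDot (s : List Char) : List Char :=
  (s.reverse.dropWhile (fun c => c == '.')).reverse

-- termination helper for the B-side loop (cited by `decreasing_by`)
theorem pvDropTail_lt {p : Char → Bool} {name t : List Char} {c : Char}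
    (h : name.dropWhile p = c :: t) : t.length < name.length := by
  have := List.length_dropWhile_le p name
  rw [h] at this; simpa using Nat.lt_of_lt_of_le (Nat.lt_succ_self _) this

-- ===== PORT A =====
-- one iteration of A's `for zname, zid in zones_by_name.items():` body
def bzfStep (fqdnL : List Char) (best : Option (String × String)) (p : String × String) :
    Option (String × String) :=
  if fqdnL == p.1.toList || PySem.Chars.endswith fqdnL ('.' :: p.1.toList) then
    match best with
    | none => some p
    | some b => if p.1.toList.length > b.1.toList.length then some p else best
  else best

def best_zone_for_name (zones_by_name : List (String × String)) (fqdn : String) :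
    Option (String × String) :=
  let fqdnL := pvRstripDot (PySem.Chars.lower fqdn.toList)
  zones_by_name.foldl (bzfStep fqdnL) none

-- ===== PORT B =====
-- Source B's `while True` loop: dict lookup of `name` (first match), else step past the first dot
-- (`name.find(".") < 0` ↔ the dropWhile leaves []; `name[dot+1:]` is exactly its tail)
def bzfGo (zones : List (String × String)) (name : List Char) : Option (String × String) :=
  match zones.find? (fun p => p.1.toList == name) with
  | some p => some (String.ofList name, p.2)
  | none =>
    match h : name.dropWhile (fun c => c ≠ '.') with
    | [] => none
    | _ :: t => bzfGo zones t
termination_by name.length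
decreasing_by exact pvDropTail_lt h

def best_zone_for_name_alt (zones_by_name : List (String × String)) (fqdn : String) :
    Option (String × String) :=
  bzfGo zones_by_name (pvRstripDot (PySem.Chars.lower fqdn.toList))

-- ===== PRECONDITION & SPEC =====
def Spec_best_zone_for_name (zones_by_name : List (String × String)) (fqdn : String) (out : Option (String × String)) : Prop := out = best_zone_for_name_alt zones_by_name fqdn
instance (zones_by_name : List (String × String)) (fqdn : String) (out : Option (String × String)) : Decidable (Spec_best_zone_for_name zones_by_name fqdn out) := by unfold Spec_best_zone_for_name; infer_instance

-- ===== CLAIM (what is proved, stated in full; the proofs are below) =====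
def Claim_equal_best_zone_for_name : Prop := ∀ (zones_by_name : List (String × String)) (fqdn : String), Dom_best_zone_for_name zones_by_name fqdn → Spec_best_zone_for_name zones_by_name fqdn (best_zone_for_name zones_by_name fqdn)

-- ===== LEMMAS AND PROOFS =====

-- unfolding equations for bzfGo (the `match h : …` in its body needs `split` to reduce)
theorem bzfGo_found {zones : List (String × String)} {L : List Char} {p : String × String}
    (hfind : zones.find? (fun q => q.1.toList == L) = some p) :
    bzfGo zones L = some (String.ofList L, p.2) := by
  rw [bzfGo, hfind]

theorem bzfGo_none {zones : List (String × String)} {L : List Char}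
    (hfind : zones.find? (fun q => q.1.toList == L) = none)
    (h : L.dropWhile (fun c => c ≠ '.') = []) : bzfGo zones L = none := by
  rw [bzfGo, hfind]
  split <;> rename_i heq
  · cases heq
  · split <;> rename_i heq2 <;> rw [h] at heq2 <;>
      first | (cases heq2; rfl) | cases heq2 | rfl

theorem bzfGo_step {zones : List (String × String)} {L : List Char} {c : Char} {t : List Char}
    (hfind : zones.find? (fun q => q.1.toList == L) = none)
    (h : L.dropWhile (fun c => c ≠ '.') = c :: t) : bzfGo zones L = bzfGo zones t := by
  rw [bzfGo, hfind]
  split <;> rename_i heq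
  · cases heq
  · split <;> rename_i heq2 <;> rw [h] at heq2 <;>
      first | (cases heq2; rfl) | cases heq2 | rfl

-- the chain of dot-delimited suffixes that bzfGo visits, longest first
def bzfChain (name : List Char) : List (List Char) :=
  name ::
    (match h : name.dropWhile (fun c => c ≠ '.') with
     | [] => []
     | _ :: t => bzfChain t)
termination_by name.length
decreasing_by exact pvDropTail_lt h

theorem bzfChain_nil {L : List Char} (h : L.dropWhile (fun c => c ≠ '.') = []) :
    bzfChain L = [L] := by
  rw [bzfChain]
  split <;> rename_i heq <;> rw [h] at heq <;>
      first | (cases heq; rfl) | cases heq | rfl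

theorem bzfChain_cons {L : List Char} {c : Char} {t : List Char}
    (h : L.dropWhile (fun c => c ≠ '.') = c :: t) : bzfChain L = L :: bzfChain t := by
  rw [bzfChain]
  split <;> rename_i heq <;> rw [h] at heq <;>
      first | (cases heq; rfl) | cases heq | rfl

-- a suffix of the form '.'::zs of u ++ '.'::t with no dot in u is t itself or sits inside t
theorem pv_suffix_dot_split {zs t : List Char} :
    ∀ (u : List Char), ('.' ∉ u) → ('.' :: zs) <:+ (u ++ '.' :: t) →
      zs = t ∨ ('.' :: zs) <:+ t := by
  intro u
  induction u with
  | nil =>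
    intro _ h
    rcases List.suffix_cons_iff.mp h with h1 | h1
    · exact Or.inl (by injection h1)
    · exact Or.inr h1
  | cons c u' ih =>
    intro hd h
    rcases List.suffix_cons_iff.mp (by simpa using h) with h1 | h1
    · exact absurd (by injection h1 with hc _; exact hc ▸ List.mem_cons_self) hd
    · exact ih (fun hm => hd (List.mem_cons_of_mem _ hm)) h1

-- membership in the chain ↔ "zs is the whole name or a dot-delimited proper suffix of it"
theorem pv_mem_chain_iff (zs : List Char) (L : List Char) :
    zs ∈ bzfChain L ↔ (zs = L ∨ ('.' :: zs) <:+ L) := by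
  rcases h : L.dropWhile (fun c => c ≠ '.') with _ | ⟨c, t⟩
  · rw [bzfChain_nil h]
    have hnd : ('.' : Char) ∉ L := by
      intro hm
      have := List.dropWhile_eq_nil_iff.mp h _ hm
      simp at this
    constructor
    · intro hm; simp at hm; exact Or.inl hm
    · rintro (rfl | hsuf)
      · simp
      · exfalso
        rcases hsuf with ⟨w, hw⟩
        exact hnd (by rw [← hw]; simp)
  · have ih := pv_mem_chain_iff zs t
    have hdec : L.takeWhile (fun c => c ≠ '.') ++ c :: t = L := by
      conv_rhs => rw [← List.takeWhile_append_dropWhile (p := fun c => c ≠ '.') (l := L)]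
      rw [h]
    have hc : c = '.' := by
      have : ¬ (fun c => c ≠ '.') c = true := by
        have := List.head?_dropWhile_not (p := fun c => c ≠ '.') (l := L)
        rw [h] at this; simpa using this
      simpa using this
    subst hc
    have hnd : ('.' : Char) ∉ L.takeWhile (fun c => c ≠ '.') := by
      intro hm; have := List.mem_takeWhile_imp hm; simp at this
    rw [bzfChain_cons h, List.mem_cons, ih]
    constructor
    · rintro (rfl | rfl | hsuf)
      · exact Or.inl rfl
      · exact Or.inr (by rw [← hdec]; exact List.suffix_append _ _)
      · exact Or.inr (hsuf.trans (by rw [← hdec]; exact (List.suffix_cons _ _).trans (List.suffix_append _ _)))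
    · rintro (rfl | hsuf)
      · exact Or.inl rfl
      · rcases pv_suffix_dot_split (L.takeWhile (fun c => c ≠ '.')) hnd
          (by rwa [hdec]) with h1 | h1
        · exact Or.inr (Or.inl h1)
        · exact Or.inr (Or.inr h1)
termination_by L.length
decreasing_by exact pvDropTail_lt h

-- every chain element is at most as long as L; proper ones are strictly shorter
theorem pv_chain_len {zs L : List Char} (hm : zs ∈ bzfChain L) : zs.length ≤ L.length := by
  rcases (pv_mem_chain_iff zs L).mp hm with rfl | hsuf
  · exact le_rfl
  · have := hsuf.length_le; simpa using Nat.le_of_succ_le this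

theorem pv_chain_tail_len {zs L : List Char} (hm : zs ∈ bzfChain L) (hne : zs ≠ L) :
    zs.length < L.length := by
  rcases (pv_mem_chain_iff zs L).mp hm with rfl | hsuf
  · exact absurd rfl hne
  · have := hsuf.length_le; simpa using this

-- A's matching condition is chain membership
theorem pv_cond_iff (L zs : List Char) :
    (L == zs || PySem.Chars.endswith L ('.' :: zs)) = true ↔ zs ∈ bzfChain L := by
  rw [pv_mem_chain_iff, Bool.or_eq_true, beq_iff_eq, PySem.Chars.endswith_iff]
  exact or_congr ⟨Eq.symm, Eq.symm⟩ Iff.rfl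

-- reduction lemmas for one step of A's fold
theorem bzfStep_not {L : List Char} {b : Option (String × String)} {p : String × String}
    (hc : (L == p.1.toList || PySem.Chars.endswith L ('.' :: p.1.toList)) = false) :
    bzfStep L b p = b := by
  simp [bzfStep, hc]

theorem bzfStep_none {L : List Char} {p : String × String}
    (hc : (L == p.1.toList || PySem.Chars.endswith L ('.' :: p.1.toList)) = true) :
    bzfStep L none p = some p := by
  simp [bzfStep, hc]

theorem bzfStep_some {L : List Char} {b p : String × String}
    (hc : (L == p.1.toList || PySem.Chars.endswith L ('.' :: p.1.toList)) = true) :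
    bzfStep L (some b) p =
      if p.1.toList.length > b.1.toList.length then some p else some b := by
  simp [bzfStep, hc]

-- a fold of bzfStep either keeps its accumulator or returns a matching pair from the list
theorem pv_foldl_result (L : List Char) :
    ∀ (l : List (String × String)) (b : Option (String × String)),
      l.foldl (bzfStep L) b = b ∨
        ∃ q ∈ l, l.foldl (bzfStep L) b = some q ∧ q.1.toList ∈ bzfChain L := by
  intro l
  induction l with
  | nil => intro b; exact Or.inl rfl
  | cons p l ih =>
    intro b
    simp only [List.foldl_cons]
    rcases ih (bzfStep L b p) with h | ⟨q, hq, hfold, hchain⟩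
    · rw [h]
      rcases hc : (L == p.1.toList || PySem.Chars.endswith L ('.' :: p.1.toList)) with _ | _
      · exact Or.inl (bzfStep_not hc)
      · have hmem := (pv_cond_iff L p.1.toList).mp hc
        match b with
        | none => exact Or.inr ⟨p, by simp, bzfStep_none hc, hmem⟩
        | some bb =>
          rw [bzfStep_some hc]
          split
          · exact Or.inr ⟨p, by simp, rfl, hmem⟩
          · exact Or.inl rfl
    · exact Or.inr ⟨q, by simp [hq], hfold, hchain⟩

-- once the accumulator holds a key of maximal length, the fold never changes it
theorem pv_foldl_keep (L : List Char) (p : String × String)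
    (hlen : p.1.toList.length = L.length) :
    ∀ (l : List (String × String)), l.foldl (bzfStep L) (some p) = some p := by
  intro l
  induction l with
  | nil => rfl
  | cons q l ih =>
    simp only [List.foldl_cons]
    have hstep : bzfStep L (some p) q = some p := by
      rcases hc : (L == q.1.toList || PySem.Chars.endswith L ('.' :: q.1.toList)) with _ | _
      · exact bzfStep_not hc
      · have hle := pv_chain_len ((pv_cond_iff L q.1.toList).mp hc)
        rw [bzfStep_some hc, if_neg (by omega)]
    rw [hstep, ih]

-- pointwise-equal step functions fold alike
theorem pv_foldl_congr {α β : Type} (f g : β → α → β) :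
    ∀ (l : List α) (b : β), (∀ a ∈ l, ∀ b', f b' a = g b' a) → l.foldl f b = l.foldl g b := by
  intro l
  induction l with
  | nil => intro _ _; rfl
  | cons a l ih =>
    intro b h
    simp only [List.foldl_cons]
    rw [h a (by simp)]
    exact ih _ (fun a' ha' b' => h a' (by simp [ha']) b')

-- the core equivalence: A's fold over the zones = B's longest-suffix-first search
theorem pv_core (zones : List (String × String)) (L : List Char) :
    zones.foldl (bzfStep L) none = bzfGo zones L := by
  rcases hfind : zones.find? (fun q => q.1.toList == L) with _ | p
  · -- the full name L is not a key
    have hnokey : ∀ q ∈ zones, q.1.toList ≠ L := by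
      intro q hq heq
      have := List.find?_eq_none.mp hfind q hq
      simp [heq] at this
    rcases h : L.dropWhile (fun c => c ≠ '.') with _ | ⟨c, t⟩
    · -- no dot left: nothing can match, both sides give none
      rw [bzfGo_none hfind h]
      have hid : ∀ q ∈ zones, ∀ b, bzfStep L b q = b := by
        intro q hq b
        refine bzfStep_not ?_
        rw [Bool.eq_false_iff]
        intro hc
        have hm := (pv_cond_iff L q.1.toList).mp hc
        rw [bzfChain_nil h] at hm
        simp at hm
        exact hnokey q hq hm
      rw [pv_foldl_congr _ (fun b _ => b) zones none hid]
      induction zones with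
      | nil => rfl
      | cons _ _ ih => simpa using ih
    · -- step past the first label: the matching conditions agree pointwise
      rw [bzfGo_step hfind h, ← pv_core zones t]
      apply pv_foldl_congr
      intro q hq b
      have hqne : q.1.toList ≠ L := hnokey q hq
      have hcond : (L == q.1.toList || PySem.Chars.endswith L ('.' :: q.1.toList))
          = (t == q.1.toList || PySem.Chars.endswith t ('.' :: q.1.toList)) := by
        rcases hb : (t == q.1.toList || PySem.Chars.endswith t ('.' :: q.1.toList)) with _ | _
        · rw [Bool.eq_false_iff]
          intro hcl
          have hm := (pv_cond_iff L q.1.toList).mp hcl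
          rw [bzfChain_cons h, List.mem_cons] at hm
          rcases hm with heq | hm'
          · exact hqne heq
          · exact absurd ((pv_cond_iff t q.1.toList).mpr hm') (by simp [hb])
        · have hm := (pv_cond_iff t q.1.toList).mp hb
          rw [pv_cond_iff, bzfChain_cons h, List.mem_cons]
          exact Or.inr hm
      unfold bzfStep
      rw [hcond]
  · -- the full name L is a key: A must return its first entry
    rw [bzfGo_found hfind]
    rcases List.find?_eq_some_iff_append.mp hfind with ⟨hp, pre, post, rfl, hpre⟩
    have hkey : p.1.toList = L := by simpa using hp
    have hcp : (L == p.1.toList || PySem.Chars.endswith L ('.' :: p.1.toList)) = true := by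
      simp [hkey]
    have hL : String.ofList L = p.1 := by rw [← hkey, String.ofList_toList]
    rw [List.foldl_append]
    have hpre' : ∀ q ∈ pre, q.1.toList ≠ L := by
      intro q hq; have := hpre q hq; simpa using this
    rcases pv_foldl_result L pre none with hnone | ⟨q, hq, hfold, hchain⟩
    · rw [hnone]
      simp only [List.foldl_cons]
      rw [bzfStep_none hcp, pv_foldl_keep L p (by rw [hkey]), hL]
    · rw [hfold]
      simp only [List.foldl_cons]
      have hqlt : q.1.toList.length < L.length := pv_chain_tail_len hchain (hpre' q hq)
      have hpl : p.1.toList.length = L.length := by rw [hkey]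
      rw [bzfStep_some hcp, if_pos (by omega), pv_foldl_keep L p hpl, hL]
termination_by L.length
decreasing_by exact pvDropTail_lt h

-- ===== VERDICT (by name: the statement is the Claim_ definition above) =====
theorem best_zone_for_name_spec : Claim_equal_best_zone_for_name := by
  intro zones fqdn _
  unfold Spec_best_zone_for_name best_zone_for_name best_zone_for_name_alt
  exact pv_core zones _
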